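-- pv_equiv track=rewrite | github.com/federica-nube/evoto-help-center-site | scripts/build_help_center.py | normalize_html_block
-- ===== SOURCE A (Python) =====
-- def normalize_html_block(html_body: str) -> str:
--     replacements = {
--         "<h7>": '<span class="micro-heading">',
--         "</h7>": "</span>",
--         "<h8>": '<span class="micro-heading">',
--         "</h8>": "</span>",
--     }
--     for original, replacement in replacements.items():
--         html_body = html_body.replace(original, replacement)
--     return html_body
-- ===== SOURCE B (Python) =====
-- def normalize_html_block(html_body: str) -> str:
--     out = []
--     i = 0
--     n = len(html_body)
--     while i < n:
--         if html_body.startswith("<h7>", i) or html_body.startswith("<h8>", i):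
--             out.append('<span class="micro-heading">')
--             i += 4
--         elif html_body.startswith("</h7>", i) or html_body.startswith("</h8>", i):
--             out.append("</span>")
--             i += 5
--         else:
--             out.append(html_body[i])
--             i += 1
--     return "".join(out)
-- ===== Notes on version B (the rewrite author's own statement) =====
-- stated objective: alternative
-- what changed: Replaces A's four sequential full-string str.replace passes with a single left-to-right scan that dispatches on the tag found at each position (open h7/h8 -> span open, close h7/h8 -> </span>, else copy the character).
import Mathlib
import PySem

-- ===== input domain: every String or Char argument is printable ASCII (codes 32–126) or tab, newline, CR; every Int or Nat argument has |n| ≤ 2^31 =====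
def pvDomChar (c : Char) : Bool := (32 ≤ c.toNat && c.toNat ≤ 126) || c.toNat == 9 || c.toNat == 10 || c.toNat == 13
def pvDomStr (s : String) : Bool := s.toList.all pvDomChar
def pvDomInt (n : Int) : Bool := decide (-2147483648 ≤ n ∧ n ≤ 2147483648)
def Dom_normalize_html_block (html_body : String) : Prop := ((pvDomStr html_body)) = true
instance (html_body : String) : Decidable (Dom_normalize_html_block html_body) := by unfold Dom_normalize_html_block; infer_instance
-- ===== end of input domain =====

-- B replaces A's four sequential str.replace passes by a single left-to-right scan that
-- dispatches on the tag found at each position (objective: alternative single-pass algorithm).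

-- ===== PORT A =====
-- literal transliteration: build the replacements dict, then fold str.replace over its items
def normalize_html_block (html_body : String) : String :=
  let replacements : PySem.Dict String String :=
    PySem.Dict.ofList
      [("<h7>", "<span class=\"micro-heading\">"),
       ("</h7>", "</span>"),
       ("<h8>", "<span class=\"micro-heading\">"),
       ("</h8>", "</span>")]
  replacements.items.foldl (fun hb p => PySem.Str.replace hb p.1 p.2) html_body

-- ===== PORT B =====
-- the four tag literals and the two replacement texts of Source B, as char lists
def pvT7o : List Char := ['<', 'h', '7', '>']
def pvT8o : List Char := ['<', 'h', '8', '>']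
def pvT7c : List Char := ['<', '/', 'h', '7', '>']
def pvT8c : List Char := ['<', '/', 'h', '8', '>']
def pvRepO : List Char :=
  ['<','s','p','a','n',' ','c','l','a','s','s','=','"','m','i','c','r','o','-','h','e','a','d','i','n','g','"','>']
def pvRepC : List Char := ['<', '/', 's', 'p', 'a', 'n', '>']

-- Source B's while loop: at each position check startswith for the two open tags, then the two
-- close tags, else copy one character (the index advancing by 4 / 5 / 1 is the drop)
def pvScanB : List Char → List Char
  | [] => []
  | c :: t =>
    if pvT7o.isPrefixOf (c :: t) || pvT8o.isPrefixOf (c :: t) then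
      pvRepO ++ pvScanB (t.drop 3)
    else if pvT7c.isPrefixOf (c :: t) || pvT8c.isPrefixOf (c :: t) then
      pvRepC ++ pvScanB (t.drop 4)
    else
      c :: pvScanB t
termination_by l => l.length
decreasing_by all_goals (simp; try omega)

def normalize_html_block_alt (html_body : String) : String :=
  String.ofList (pvScanB html_body.toList)

-- ===== PRECONDITION & SPEC =====
def Spec_normalize_html_block (html_body : String) (out : String) : Prop := out = normalize_html_block_alt html_body
instance (html_body : String) (out : String) : Decidable (Spec_normalize_html_block html_body out) := by unfold Spec_normalize_html_block; infer_instance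

-- ===== CLAIM (what is proved, stated in full; the proofs are below) =====
def Claim_equal_normalize_html_block : Prop := ∀ (html_body : String), Dom_normalize_html_block html_body → Spec_normalize_html_block html_body (normalize_html_block html_body)

-- ===== LEMMAS AND PROOFS =====

-- single-pattern replace as a clean structural recursion (pattern o :: os is nonempty)
def rpl (o : Char) (os new : List Char) : List Char → List Char
  | [] => []
  | c :: t =>
    if (o :: os).isPrefixOf (c :: t) then new ++ rpl o os new (t.drop os.length)
    else c :: rpl o os new t
termination_by l => l.length
decreasing_by all_goals (simp; try omega)

theorem rpl_nil (o : Char) (os new : List Char) : rpl o os new [] = [] := by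
  rw [rpl.eq_def]

theorem rpl_match (o : Char) (os new t : List Char) :
    rpl o os new ((o :: os) ++ t) = new ++ rpl o os new t := by
  show rpl o os new (o :: (os ++ t)) = _
  rw [rpl.eq_def]; dsimp only
  rw [if_pos (by simp [List.isPrefixOf_iff_prefix, List.prefix_append])]
  rw [List.drop_left]

theorem rpl_nomatch (o : Char) (os new : List Char) (c : Char) (t : List Char)
    (h : ¬ (o :: os) <+: (c :: t)) :
    rpl o os new (c :: t) = c :: rpl o os new t := by
  rw [rpl.eq_def]; dsimp only
  rw [if_neg (by simpa [List.isPrefixOf_iff_prefix] using h)]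

-- a mismatch already inside w forces the prefix test to fail whatever follows w
theorem prefix_append_false (p w x : List Char)
    (h1 : ¬ p <+: w) (h2 : ¬ w <+: p) : ¬ p <+: (w ++ x) := by
  induction w generalizing p with
  | nil => exact absurd (List.nil_prefix) h2
  | cons b w' ih =>
    cases p with
    | nil => exact absurd (List.nil_prefix) h1
    | cons a p' =>
      rw [List.cons_append, List.cons_prefix_cons]
      rintro ⟨rfl, hpre⟩
      exact ih p' (fun hh => h1 (List.cons_prefix_cons.mpr ⟨rfl, hh⟩))
        (fun hh => h2 (List.cons_prefix_cons.mpr ⟨rfl, hh⟩)) hpre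

-- rpl passes over a block w in which the pattern can never start
theorem rpl_append (o : Char) (os new w : List Char)
    (h : ∀ i ∈ List.range w.length,
      ¬ (o :: os) <+: (w.drop i) ∧ ¬ (w.drop i) <+: (o :: os)) :
    ∀ x, rpl o os new (w ++ x) = w ++ rpl o os new x := by
  induction w with
  | nil => intro x; simp
  | cons a w' ih =>
    intro x
    have h0 := h 0 (by simp)
    simp only [List.drop_zero] at h0
    have hx : ¬ (o :: os) <+: ((a :: w') ++ x) := prefix_append_false _ _ _ h0.1 h0.2
    rw [List.cons_append] at hx ⊢
    rw [rpl_nomatch _ _ _ _ _ hx]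
    rw [ih (fun i hi => by simpa using h (i + 1) (by simp at hi ⊢; omega))]
    simp

-- rpl neither creates nor destroys a prefix q whose every nonempty suffix clashes with
-- both the pattern and the replacement within their own length
theorem rpl_reflect (o : Char) (os new q : List Char)
    (hq : ∀ q' ∈ q.tails, q' = [] ∨
      (¬ q' <+: new ∧ ¬ new <+: q' ∧ ¬ q' <+: (o :: os) ∧ ¬ (o :: os) <+: q')) :
    ∀ (n : Nat) (t : List Char), t.length ≤ n → ∀ q' ∈ q.tails,
      (q' <+: rpl o os new t ↔ q' <+: t) := by
  intro n
  induction n with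
  | zero =>
    intro t ht q' _
    have : t = [] := by cases t <;> simp_all
    subst this; rw [rpl_nil]
  | succ n ih =>
    intro t ht q' hq'
    cases t with
    | nil => rw [rpl_nil]
    | cons c t' =>
      by_cases hp : (o :: os) <+: (c :: t')
      · obtain ⟨t2, h2⟩ := hp
        rw [← h2, rpl_match]
        rcases hq q' hq' with rfl | ⟨ha, hb, hc, hd⟩
        · simp
        · exact iff_of_false (prefix_append_false _ _ _ ha hb) (prefix_append_false _ _ _ hc hd)
      · rw [rpl_nomatch _ _ _ _ _ hp]
        cases q' with
        | nil => simp
        | cons qc q'' =>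
          have hq'' : q'' ∈ q.tails := by
            rw [List.mem_tails] at hq' ⊢
            exact (List.suffix_cons qc q'').trans hq'
          rw [List.cons_prefix_cons, List.cons_prefix_cons]
          exact and_congr_right fun _ => ih t' (by simp at ht; omega) q'' hq''

-- the four single-pattern replaces of A, on char lists
def pvR7o (l : List Char) : List Char := rpl '<' ['h', '7', '>'] pvRepO l
def pvR7c (l : List Char) : List Char := rpl '<' ['/', 'h', '7', '>'] pvRepC l
def pvR8o (l : List Char) : List Char := rpl '<' ['h', '8', '>'] pvRepO l
def pvR8c (l : List Char) : List Char := rpl '<' ['/', 'h', '8', '>'] pvRepC l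

-- pass-over instances: each later replace passes over an earlier pattern / replacement text
theorem passO_7c : ∀ x, pvR7c (pvRepO ++ x) = pvRepO ++ pvR7c x :=
  rpl_append '<' ['/', 'h', '7', '>'] pvRepC pvRepO (by decide)
theorem passO_8o : ∀ x, pvR8o (pvRepO ++ x) = pvRepO ++ pvR8o x :=
  rpl_append '<' ['h', '8', '>'] pvRepO pvRepO (by decide)
theorem passO_8c : ∀ x, pvR8c (pvRepO ++ x) = pvRepO ++ pvR8c x :=
  rpl_append '<' ['/', 'h', '8', '>'] pvRepC pvRepO (by decide)
theorem passC_8o : ∀ x, pvR8o (pvRepC ++ x) = pvRepC ++ pvR8o x :=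
  rpl_append '<' ['h', '8', '>'] pvRepO pvRepC (by decide)
theorem passC_8c : ∀ x, pvR8c (pvRepC ++ x) = pvRepC ++ pvR8c x :=
  rpl_append '<' ['/', 'h', '8', '>'] pvRepC pvRepC (by decide)
theorem passT8o_7o : ∀ x, pvR7o (pvT8o ++ x) = pvT8o ++ pvR7o x :=
  rpl_append '<' ['h', '7', '>'] pvRepO pvT8o (by decide)
theorem passT8o_7c : ∀ x, pvR7c (pvT8o ++ x) = pvT8o ++ pvR7c x :=
  rpl_append '<' ['/', 'h', '7', '>'] pvRepC pvT8o (by decide)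
theorem passT7c_7o : ∀ x, pvR7o (pvT7c ++ x) = pvT7c ++ pvR7o x :=
  rpl_append '<' ['h', '7', '>'] pvRepO pvT7c (by decide)
theorem passT8c_7o : ∀ x, pvR7o (pvT8c ++ x) = pvT8c ++ pvR7o x :=
  rpl_append '<' ['h', '7', '>'] pvRepO pvT8c (by decide)
theorem passT8c_7c : ∀ x, pvR7c (pvT8c ++ x) = pvT8c ++ pvR7c x :=
  rpl_append '<' ['/', 'h', '7', '>'] pvRepC pvT8c (by decide)
theorem passT8c_8o : ∀ x, pvR8o (pvT8c ++ x) = pvT8c ++ pvR8o x :=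
  rpl_append '<' ['h', '8', '>'] pvRepO pvT8c (by decide)

-- reflection instances: a pending close/open-tag remainder survives the earlier replaces
theorem refl7o_sh7 (t : List Char) : ['/', 'h', '7', '>'] <+: pvR7o t ↔ ['/', 'h', '7', '>'] <+: t :=
  rpl_reflect '<' ['h', '7', '>'] pvRepO ['/', 'h', '7', '>'] (by decide) t.length t le_rfl _
    (List.mem_tails _ _ |>.mpr (List.suffix_refl _))
theorem refl7o_h8 (t : List Char) : ['h', '8', '>'] <+: pvR7o t ↔ ['h', '8', '>'] <+: t :=
  rpl_reflect '<' ['h', '7', '>'] pvRepO ['h', '8', '>'] (by decide) t.length t le_rfl _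
    (List.mem_tails _ _ |>.mpr (List.suffix_refl _))
theorem refl7c_h8 (t : List Char) : ['h', '8', '>'] <+: pvR7c t ↔ ['h', '8', '>'] <+: t :=
  rpl_reflect '<' ['/', 'h', '7', '>'] pvRepC ['h', '8', '>'] (by decide) t.length t le_rfl _
    (List.mem_tails _ _ |>.mpr (List.suffix_refl _))
theorem refl7o_sh8 (t : List Char) : ['/', 'h', '8', '>'] <+: pvR7o t ↔ ['/', 'h', '8', '>'] <+: t :=
  rpl_reflect '<' ['h', '7', '>'] pvRepO ['/', 'h', '8', '>'] (by decide) t.length t le_rfl _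
    (List.mem_tails _ _ |>.mpr (List.suffix_refl _))
theorem refl7c_sh8 (t : List Char) : ['/', 'h', '8', '>'] <+: pvR7c t ↔ ['/', 'h', '8', '>'] <+: t :=
  rpl_reflect '<' ['/', 'h', '7', '>'] pvRepC ['/', 'h', '8', '>'] (by decide) t.length t le_rfl _
    (List.mem_tails _ _ |>.mpr (List.suffix_refl _))
theorem refl8o_sh8 (t : List Char) : ['/', 'h', '8', '>'] <+: pvR8o t ↔ ['/', 'h', '8', '>'] <+: t :=
  rpl_reflect '<' ['h', '8', '>'] pvRepO ['/', 'h', '8', '>'] (by decide) t.length t le_rfl _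
    (List.mem_tails _ _ |>.mpr (List.suffix_refl _))

-- PySem.Chars.replace with a nonempty pattern is rpl
theorem go_eq_rpl (o : Char) (os new : List Char) :
    ∀ (fuel : Nat) (l acc : List Char), l.length ≤ fuel →
      PySem.Chars.replace.go (o :: os) new fuel l acc = acc.reverse ++ rpl o os new l := by
  intro fuel
  induction fuel with
  | zero =>
    intro l acc h
    have : l = [] := by cases l <;> simp_all
    subst this
    rw [PySem.Chars.replace.go.eq_def]
    simp [rpl_nil]
  | succ n ih =>
    intro l acc h
    cases l with
    | nil =>
      rw [PySem.Chars.replace.go.eq_def]; dsimp only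
      rw [rpl_nil]; simp
    | cons c t =>
      rw [PySem.Chars.replace.go.eq_def]; dsimp only
      by_cases hp : (o :: os) <+: (c :: t)
      · rw [if_pos (List.isPrefixOf_iff_prefix.mpr hp)]
        obtain ⟨t2, h2⟩ := hp
        have hlen : t2.length ≤ n := by
          have := congrArg List.length h2
          simp at this h
          omega
        rw [← h2, List.drop_left, ih t2 (new.reverse ++ acc) hlen, rpl_match]
        simp
      · rw [if_neg (by simpa [List.isPrefixOf_iff_prefix] using hp)]
        rw [ih t (c :: acc) (by simp at h; omega), rpl_nomatch _ _ _ _ _ hp]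
        simp

theorem replace_eq_rpl (s : List Char) (o : Char) (os new : List Char) :
    PySem.Chars.replace s (o :: os) new = rpl o os new s := by
  rw [PySem.Chars.replace]
  simpa using go_eq_rpl o os new s.length s [] le_rfl

-- computation rules of the scan
theorem scan_7o (t : List Char) :
    pvScanB ('<' :: 'h' :: '7' :: '>' :: t) = pvRepO ++ pvScanB t := by
  rw [pvScanB.eq_def]; dsimp only
  rw [if_pos (by simp [pvT7o, List.isPrefixOf])]
  rfl

theorem scan_8o (t : List Char) :
    pvScanB ('<' :: 'h' :: '8' :: '>' :: t) = pvRepO ++ pvScanB t := by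
  rw [pvScanB.eq_def]; dsimp only
  rw [if_pos (by simp [pvT8o, List.isPrefixOf])]
  rfl

theorem scan_7c (t : List Char) :
    pvScanB ('<' :: '/' :: 'h' :: '7' :: '>' :: t) = pvRepC ++ pvScanB t := by
  rw [pvScanB.eq_def]; dsimp only
  rw [if_neg (by simp [pvT7o, pvT8o, List.isPrefixOf]),
      if_pos (by simp [pvT7c, List.isPrefixOf])]
  rfl

theorem scan_8c (t : List Char) :
    pvScanB ('<' :: '/' :: 'h' :: '8' :: '>' :: t) = pvRepC ++ pvScanB t := by
  rw [pvScanB.eq_def]; dsimp only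
  rw [if_neg (by simp [pvT7o, pvT8o, List.isPrefixOf]),
      if_pos (by simp [pvT7c, pvT8c, List.isPrefixOf])]
  rfl

theorem scan_cons (c : Char) (t : List Char)
    (h1 : ¬ pvT7o <+: (c :: t)) (h2 : ¬ pvT8o <+: (c :: t))
    (h3 : ¬ pvT7c <+: (c :: t)) (h4 : ¬ pvT8c <+: (c :: t)) :
    pvScanB (c :: t) = c :: pvScanB t := by
  rw [pvScanB.eq_def]; dsimp only
  rw [if_neg (by simp [List.isPrefixOf_iff_prefix]; exact ⟨h1, h2⟩),
      if_neg (by simp [List.isPrefixOf_iff_prefix]; exact ⟨h3, h4⟩)]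

-- the main equivalence on char lists: A's four passes equal B's single scan
theorem pvMainAux : ∀ (n : Nat) (l : List Char), l.length ≤ n →
    pvR8c (pvR8o (pvR7c (pvR7o l))) = pvScanB l := by
  intro n
  induction n with
  | zero =>
    intro l h
    have : l = [] := by cases l <;> simp_all
    subst this
    simp [pvR7o, pvR7c, pvR8o, pvR8c, rpl_nil, pvScanB]
  | succ n ih =>
    intro l hlen
    cases l with
    | nil => simp [pvR7o, pvR7c, pvR8o, pvR8c, rpl_nil, pvScanB]
    | cons c t =>
      by_cases hp1 : pvT7o <+: (c :: t)
      · obtain ⟨t1, h1⟩ := hp1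
        have hlen1 : t1.length ≤ n := by
          have := congrArg List.length h1
          simp [pvT7o] at this hlen
          omega
        rw [← h1, show pvT7o ++ t1 = '<' :: 'h' :: '7' :: '>' :: t1 from rfl]
        have e1 : pvR7o ('<' :: 'h' :: '7' :: '>' :: t1) = pvRepO ++ pvR7o t1 :=
          rpl_match '<' ['h', '7', '>'] pvRepO t1
        rw [e1, passO_7c, passO_8o, passO_8c, ih t1 hlen1, scan_7o]
      by_cases hp2 : pvT8o <+: (c :: t)
      · obtain ⟨t1, h1⟩ := hp2
        have hlen1 : t1.length ≤ n := by
          have := congrArg List.length h1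
          simp [pvT8o] at this hlen
          omega
        rw [← h1, show pvT8o ++ t1 = '<' :: 'h' :: '8' :: '>' :: t1 from rfl]
        have f2 : pvR7o ('<' :: 'h' :: '8' :: '>' :: t1) = pvT8o ++ pvR7o t1 := passT8o_7o t1
        rw [f2, passT8o_7c]
        have e2 : pvR8o (pvT8o ++ pvR7c (pvR7o t1)) = pvRepO ++ pvR8o (pvR7c (pvR7o t1)) :=
          rpl_match '<' ['h', '8', '>'] pvRepO _
        rw [e2, passO_8c, ih t1 hlen1, scan_8o]
      by_cases hp3 : pvT7c <+: (c :: t)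
      · obtain ⟨t1, h1⟩ := hp3
        have hlen1 : t1.length ≤ n := by
          have := congrArg List.length h1
          simp [pvT7c] at this hlen
          omega
        rw [← h1, show pvT7c ++ t1 = '<' :: '/' :: 'h' :: '7' :: '>' :: t1 from rfl]
        have f3 : pvR7o ('<' :: '/' :: 'h' :: '7' :: '>' :: t1) = pvT7c ++ pvR7o t1 := passT7c_7o t1
        rw [f3]
        have e3 : pvR7c (pvT7c ++ pvR7o t1) = pvRepC ++ pvR7c (pvR7o t1) :=
          rpl_match '<' ['/', 'h', '7', '>'] pvRepC _
        rw [e3, passC_8o, passC_8c, ih t1 hlen1, scan_7c]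
      by_cases hp4 : pvT8c <+: (c :: t)
      · obtain ⟨t1, h1⟩ := hp4
        have hlen1 : t1.length ≤ n := by
          have := congrArg List.length h1
          simp [pvT8c] at this hlen
          omega
        rw [← h1, show pvT8c ++ t1 = '<' :: '/' :: 'h' :: '8' :: '>' :: t1 from rfl]
        have f4 : pvR7o ('<' :: '/' :: 'h' :: '8' :: '>' :: t1) = pvT8c ++ pvR7o t1 := passT8c_7o t1
        rw [f4, passT8c_7c, passT8c_8o]
        have e4 : pvR8c (pvT8c ++ pvR8o (pvR7c (pvR7o t1))) = pvRepC ++ pvR8c (pvR8o (pvR7c (pvR7o t1))) :=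
          rpl_match '<' ['/', 'h', '8', '>'] pvRepC _
        rw [e4, ih t1 hlen1, scan_8c]
      -- generic character: every stage copies c and recurses on the tail
      · have g1 : pvR7o (c :: t) = c :: pvR7o t :=
          rpl_nomatch '<' ['h', '7', '>'] pvRepO c t (by simpa [pvT7o] using hp1)
        have g2 : pvR7c (c :: pvR7o t) = c :: pvR7c (pvR7o t) := by
          refine rpl_nomatch '<' ['/', 'h', '7', '>'] pvRepC c _ ?_
          intro hcon
          obtain ⟨hc, hrest⟩ := List.cons_prefix_cons.mp hcon
          rw [refl7o_sh7 t] at hrest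
          exact hp3 (by simpa [pvT7c, List.cons_prefix_cons] using And.intro hc hrest)
        have g3 : pvR8o (c :: pvR7c (pvR7o t)) = c :: pvR8o (pvR7c (pvR7o t)) := by
          refine rpl_nomatch '<' ['h', '8', '>'] pvRepO c _ ?_
          intro hcon
          obtain ⟨hc, hrest⟩ := List.cons_prefix_cons.mp hcon
          rw [refl7c_h8 (pvR7o t), refl7o_h8 t] at hrest
          exact hp2 (by simpa [pvT8o, List.cons_prefix_cons] using And.intro hc hrest)
        have g4 : pvR8c (c :: pvR8o (pvR7c (pvR7o t))) = c :: pvR8c (pvR8o (pvR7c (pvR7o t))) := by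
          refine rpl_nomatch '<' ['/', 'h', '8', '>'] pvRepC c _ ?_
          intro hcon
          obtain ⟨hc, hrest⟩ := List.cons_prefix_cons.mp hcon
          rw [refl8o_sh8 (pvR7c (pvR7o t)), refl7c_sh8 (pvR7o t), refl7o_sh8 t] at hrest
          exact hp4 (by simpa [pvT8c, List.cons_prefix_cons] using And.intro hc hrest)
        rw [g1, g2, g3, g4, ih t (by simp at hlen; omega), scan_cons c t hp1 hp2 hp3 hp4]

-- ===== VERDICT (by name: the statement is the Claim_ definition above) =====
theorem normalize_html_block_spec : Claim_equal_normalize_html_block := by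
  unfold Claim_equal_normalize_html_block Spec_normalize_html_block
  intro hb _
  unfold normalize_html_block normalize_html_block_alt
  dsimp only
  have hitems : (PySem.Dict.ofList
      [("<h7>", "<span class=\"micro-heading\">"),
       ("</h7>", "</span>"),
       ("<h8>", "<span class=\"micro-heading\">"),
       ("</h8>", "</span>")] : PySem.Dict String String).items =
      [("<h7>", "<span class=\"micro-heading\">"),
       ("</h7>", "</span>"),
       ("<h8>", "<span class=\"micro-heading\">"),
       ("</h8>", "</span>")] := by decide
  rw [hitems]
  simp only [List.foldl]
  show PySem.Str.replace _ "</h8>" "</span>" = _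
  rw [PySem.Str.replace]
  rw [PySem.Str.toList_replace, PySem.Str.toList_replace, PySem.Str.toList_replace]
  congr 1
  have b7o : ("<h7>" : String).toList = '<' :: ['h', '7', '>'] := by decide
  have b8o : ("<h8>" : String).toList = '<' :: ['h', '8', '>'] := by decide
  have b7c : ("</h7>" : String).toList = '<' :: ['/', 'h', '7', '>'] := by decide
  have b8c : ("</h8>" : String).toList = '<' :: ['/', 'h', '8', '>'] := by decide
  have bO : ("<span class=\"micro-heading\">" : String).toList = pvRepO := by decide
  have bC : ("</span>" : String).toList = pvRepC := by decide
  rw [b7o, b8o, b7c, b8c, bO, bC]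
  rw [replace_eq_rpl, replace_eq_rpl, replace_eq_rpl, replace_eq_rpl]
  exact pvMainAux hb.toList.length hb.toList le_rfl
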